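-- pv_equiv track=rewrite | github.com/A1rPun/castle-builders | ccbuilder/util.py | splitBytesOn
-- ===== SOURCE A (Python) =====
-- def splitBytesOn(byteArray, splitter="00"):
--     newList = []
--     chunk = []
--
--     for byte in byteArray:
--         if byte == splitter:
--             newList.append(chunk)
--             chunk = []
--         else:
--             chunk.append(byte)
--
--     newList.append(chunk)
--     return newList
-- ===== SOURCE B (Python) =====
-- def splitBytesOn(byteArray, splitter="00"):
--     positions = [i for i, b in enumerate(byteArray) if b == splitter]
--     chunks = []
--     start = 0
--     for pos in positions:
--         chunks.append(byteArray[start:pos])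
--         start = pos + 1
--     chunks.append(byteArray[start:])
--     return chunks
-- ===== Notes on version B (the rewrite author's own statement) =====
-- stated objective: alternative
-- what changed: Replaced the element-by-element accumulation loop (appending each byte to a growing chunk) by locate-then-slice: first collect the indices of the delimiter, then emit each chunk as a slice between consecutive delimiter positions.
import Mathlib
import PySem

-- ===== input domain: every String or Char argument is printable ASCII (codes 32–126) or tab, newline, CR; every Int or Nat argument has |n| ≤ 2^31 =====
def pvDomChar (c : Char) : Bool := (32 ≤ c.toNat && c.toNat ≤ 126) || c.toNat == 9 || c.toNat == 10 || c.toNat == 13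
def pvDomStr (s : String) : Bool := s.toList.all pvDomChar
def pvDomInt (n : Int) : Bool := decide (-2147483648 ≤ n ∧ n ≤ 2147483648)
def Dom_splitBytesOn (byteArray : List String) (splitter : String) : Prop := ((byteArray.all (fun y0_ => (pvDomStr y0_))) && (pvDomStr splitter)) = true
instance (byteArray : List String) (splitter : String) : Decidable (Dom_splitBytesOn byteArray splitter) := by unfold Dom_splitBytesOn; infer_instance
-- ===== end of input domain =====

-- B changes the decomposition: instead of A's element-by-element accumulation loop,
-- B first collects the delimiter indices and then emits each chunk as a slice
-- between consecutive delimiter positions (objective: alternative, same cost).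

-- ===== PORT A =====
-- A's loop body: append to the current chunk, or flush it on the delimiter.
def pvStepA (splitter : String) (acc : List (List String) × List String) (byte : String) :
    List (List String) × List String :=
  if byte == splitter then (acc.1 ++ [acc.2], []) else (acc.1, acc.2 ++ [byte])

def splitBytesOn (byteArray : List String) (splitter : String) : List (List String) :=
  let st := byteArray.foldl (pvStepA splitter) ([], [])
  st.1 ++ [st.2]

-- ===== PORT B =====
-- B's loop body: emit byteArray[start:pos] and move start past the delimiter.
def pvStepB (byteArray : List String) (acc : List (List String) × Int) (pos : Int) :
    List (List String) × Int :=
  (acc.1 ++ [PySem.List.slice byteArray (some acc.2) (some pos)], pos + 1)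

def splitBytesOn_alt (byteArray : List String) (splitter : String) : List (List String) :=
  let positions := ((PySem.List.enumerate byteArray 0).filter (fun p => p.2 == splitter)).map (·.1)
  let st := positions.foldl (pvStepB byteArray) ([], 0)
  st.1 ++ [PySem.List.slice byteArray (some st.2) none]

-- ===== PRECONDITION & SPEC =====
def Spec_splitBytesOn (byteArray : List String) (splitter : String) (out : List (List String)) : Prop := out = splitBytesOn_alt byteArray splitter
instance (byteArray : List String) (splitter : String) (out : List (List String)) : Decidable (Spec_splitBytesOn byteArray splitter out) := by unfold Spec_splitBytesOn; infer_instance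

-- ===== CLAIM (what is proved, stated in full; the proofs are below) =====
def Claim_equal_splitBytesOn : Prop := ∀ (byteArray : List String) (splitter : String), Dom_splitBytesOn byteArray splitter → Spec_splitBytesOn byteArray splitter (splitBytesOn byteArray splitter)

-- ===== LEMMAS AND PROOFS =====

-- Reference recursion both ports are proved equal to.
def pvSplit (s : String) : List String → List (List String)
  | [] => [[]]
  | x :: r =>
    if x == s then [] :: pvSplit s r
    else match pvSplit s r with
      | [] => [[x]]
      | c :: cs => (x :: c) :: cs

-- Prepend a pending chunk onto the head of a chunk list.
def pvConsHd (ch : List String) : List (List String) → List (List String)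
  | [] => [ch]
  | c :: cs => (ch ++ c) :: cs

theorem pvSplit_ne_nil (s : String) (xs : List String) : pvSplit s xs ≠ [] := by
  cases xs with
  | nil => simp [pvSplit]
  | cons x r =>
    simp only [pvSplit]
    split
    · simp
    · split <;> simp

theorem pvConsHd_nil (l : List (List String)) (h : l ≠ []) : pvConsHd [] l = l := by
  cases l with
  | nil => exact absurd rfl h
  | cons c cs => simp [pvConsHd]

-- A-side invariant.
theorem foldA_eq (s : String) (xs : List String) : ∀ (nl : List (List String)) (ch : List String),
    (xs.foldl (pvStepA s) (nl, ch)).1 ++ [(xs.foldl (pvStepA s) (nl, ch)).2]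
      = nl ++ pvConsHd ch (pvSplit s xs) := by
  induction xs with
  | nil => intro nl ch; simp [pvSplit, pvConsHd]
  | cons x r ih =>
    intro nl ch
    by_cases hx : x == s
    · simp only [List.foldl_cons, pvStepA, hx, if_pos, pvSplit]
      rw [ih]
      have := pvSplit_ne_nil s r
      cases hr : pvSplit s r with
      | nil => exact absurd hr this
      | cons c cs => simp [pvConsHd]
    · simp only [List.foldl_cons, pvStepA, hx, if_neg, Bool.false_eq_true, not_false_iff, pvSplit]
      rw [ih]
      have := pvSplit_ne_nil s r
      cases hr : pvSplit s r with
      | nil => exact absurd hr this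
      | cons c cs => simp [pvConsHd]

theorem splitBytesOn_eq_pvSplit (xs : List String) (s : String) :
    splitBytesOn xs s = pvSplit s xs := by
  have h := foldA_eq s xs [] []
  simpa [splitBytesOn, pvConsHd_nil _ (pvSplit_ne_nil s xs)] using h

-- B-side invariant: folding the delimiter positions of the tail `xs` (enumerated from k)
-- with pending start j ≤ k appends pvSplit of xs with the pending slice glued to its head.
theorem foldB_eq (s : String) (xs : List String) :
    ∀ (ys : List String) (k j : Nat) (acc : List (List String)),
    j ≤ k → ys.drop k = xs → ys.length = k + xs.length →
    (let st := (((PySem.List.enumerate xs (k : Int)).filter (fun p => p.2 == s)).map (·.1)).foldl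
        (pvStepB ys) (acc, (j : Int));
      st.1 ++ [PySem.List.slice ys (some st.2) none])
      = acc ++ pvConsHd ((ys.drop j).take (k - j)) (pvSplit s xs) := by
  induction xs with
  | nil =>
    intro ys k j acc hj hdrop hlen
    simp only [PySem.List.enumerate_nil, List.filter_nil, List.map_nil, List.foldl_nil,
      pvSplit, pvConsHd, PySem.List.slice_from_natCast]
    simp only [List.length_nil] at hlen
    have hl : (ys.drop j).length = k - j := by
      rw [List.length_drop]; omega
    have hfull : (ys.drop j).take (k - j) = ys.drop j := by
      rw [← hl]; exact List.take_length
    rw [hfull]; simp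
  | cons x r ih =>
    intro ys k j acc hj hdrop hlen
    have hget : ys[k]? = some x := by
      have h0 : (ys.drop k)[0]? = some x := by rw [hdrop]; rfl
      rw [List.getElem?_drop] at h0; simpa using h0
    have hdrop' : ys.drop (k + 1) = r := by
      rw [← List.drop_drop, hdrop]; simp
    have hlen' : ys.length = (k + 1) + r.length := by
      simp at hlen; omega
    have hcast : (k : Int) + 1 = ((k + 1 : Nat) : Int) := by push_cast; ring
    by_cases hx : x == s
    · -- delimiter at position k: emit ys[j:k], restart at k+1
      simp only [PySem.List.enumerate_cons, List.filter_cons, hx, if_pos, List.map_cons,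
        List.foldl_cons, pvStepB, PySem.List.slice_natCast, hcast, pvSplit]
      have h := ih ys (k + 1) (k + 1) (acc ++ [(ys.drop j).take (k - j)]) (le_refl _) hdrop' hlen'
      rw [h]
      have hnil : (ys.drop (k + 1)).take (k + 1 - (k + 1)) = [] := by simp
      rw [hnil, pvConsHd_nil _ (pvSplit_ne_nil s r)]
      cases hr : pvSplit s r with
      | nil => exact absurd hr (pvSplit_ne_nil s r)
      | cons c cs => simp [pvConsHd]
    · -- not a delimiter: position list unchanged, pending chunk grows by x
      simp only [PySem.List.enumerate_cons, List.filter_cons, hx, Bool.false_eq_true, if_false,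
        hcast, pvSplit]
      have h := ih ys (k + 1) j acc (by omega) hdrop' hlen'
      rw [h]
      have hchunk : (ys.drop j).take (k + 1 - j) = (ys.drop j).take (k - j) ++ [x] := by
        have h1 : k + 1 - j = (k - j) + 1 := by omega
        rw [h1, List.take_add_one]
        have : (ys.drop j)[k - j]? = some x := by
          rw [List.getElem?_drop]
          have hjk : j + (k - j) = k := by omega
          rw [hjk, hget]
        simp [this]
      rw [hchunk]
      cases hr : pvSplit s r with
      | nil => exact absurd hr (pvSplit_ne_nil s r)
      | cons c cs => simp [pvConsHd]

theorem splitBytesOn_alt_eq_pvSplit (xs : List String) (s : String) :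
    splitBytesOn_alt xs s = pvSplit s xs := by
  have h := foldB_eq s xs xs 0 0 [] (le_refl _) (by simp) (by simp)
  simpa [splitBytesOn_alt, pvConsHd_nil _ (pvSplit_ne_nil s xs)] using h

-- ===== VERDICT (by name: the statement is the Claim_ definition above) =====
theorem splitBytesOn_spec : Claim_equal_splitBytesOn := by
  intro byteArray splitter _
  unfold Spec_splitBytesOn
  rw [splitBytesOn_eq_pvSplit, splitBytesOn_alt_eq_pvSplit]
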